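-- pv_equiv track=rewrite | github.com/Umm-e-Habiba1999/ai-employee | skills/approval_manager.py | determine_approval_needed
-- ===== SOURCE A (Python) =====
-- def determine_approval_needed(content):
--     """Determine if approval is needed based on content"""
--     content_lower = content.lower()
--
--     # Approval required for these actions
--     approval_keywords = [
--         'payment', 'finance', 'expense', 'purchase',
--         'email', 'communication', 'send', 'reply',
--         'new contact', 'new person', 'financial',
--         'transfer', 'bill', 'invoice', 'subscription'
--     ]
--
--     for keyword in approval_keywords:
--         if keyword in content_lower:
--             return True
--
--     return False
-- ===== SOURCE B (Python) =====
-- def determine_approval_needed(content):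
--     """Determine if approval is needed based on content"""
--     approval_keywords = [
--         'payment', 'finance', 'expense', 'purchase',
--         'email', 'communication', 'send', 'reply',
--         'new contact', 'new person', 'financial',
--         'transfer', 'bill', 'invoice', 'subscription'
--     ]
--     s = content.lower()
--     # single left-to-right pass over positions; at each position test keyword prefixes
--     return any(
--         any(s.startswith(k, i) for k in approval_keywords)
--         for i in range(len(s))
--     )
-- ===== Notes on version B (the rewrite author's own statement) =====
-- stated objective: alternative
-- what changed: Replaces A's keyword-major loop of independent substring scans ('k in s' per keyword) by a position-major single pass over the content that tests all keyword prefixes at each position.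
import Mathlib
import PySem

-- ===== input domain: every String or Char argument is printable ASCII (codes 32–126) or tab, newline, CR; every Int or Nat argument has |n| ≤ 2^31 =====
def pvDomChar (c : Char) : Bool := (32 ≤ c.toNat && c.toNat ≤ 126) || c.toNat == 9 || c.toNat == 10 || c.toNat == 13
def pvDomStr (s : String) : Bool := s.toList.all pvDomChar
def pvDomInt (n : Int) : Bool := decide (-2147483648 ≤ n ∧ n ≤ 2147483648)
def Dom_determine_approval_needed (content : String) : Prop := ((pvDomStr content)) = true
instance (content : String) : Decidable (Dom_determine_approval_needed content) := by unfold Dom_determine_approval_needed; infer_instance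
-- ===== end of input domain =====

-- B replaces A's per-keyword substring scans by one position-major pass over the content (alternative decomposition, same cost).

-- the literal keyword list both Python sources embed
def approvalKeywords : List String :=
  ["payment", "finance", "expense", "purchase",
   "email", "communication", "send", "reply",
   "new contact", "new person", "financial",
   "transfer", "bill", "invoice", "subscription"]

-- ===== PORT A =====
-- the 'for keyword in approval_keywords: if keyword in content_lower: return True' loop
def loopA : List String → String → Bool
  | [], _ => false
  | k :: rest, cl => if PySem.Str.isIn k cl then true else loopA rest cl

def determine_approval_needed (content : String) : Bool :=
  loopA approvalKeywords (PySem.Str.lower content)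

-- ===== PORT B =====
-- 'any(any(s.startswith(k, i) for k in approval_keywords) for i in range(len(s)))':
-- structural recursion over the suffixes of s (position i ↦ suffix starting at i)
def scanB : List Char → Bool
  | [] => false
  | c :: rest =>
      (approvalKeywords.any fun k => PySem.Chars.startswith (c :: rest) k.toList) || scanB rest

def determine_approval_needed_alt (content : String) : Bool :=
  scanB (PySem.Str.lower content).toList

-- ===== PRECONDITION & SPEC =====
def Spec_determine_approval_needed (content : String) (out : Bool) : Prop := out = determine_approval_needed_alt content
instance (content : String) (out : Bool) : Decidable (Spec_determine_approval_needed content out) := by unfold Spec_determine_approval_needed; infer_instance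

-- ===== CLAIM (what is proved, stated in full; the proofs are below) =====
def Claim_equal_determine_approval_needed : Prop := ∀ (content : String), Dom_determine_approval_needed content → Spec_determine_approval_needed content (determine_approval_needed content)

-- ===== LEMMAS AND PROOFS =====

-- A's early-return loop is 'any keyword is a substring'
theorem loopA_eq_any (kws : List String) (cl : String) :
    loopA kws cl = kws.any (fun k => PySem.Str.isIn k cl) := by
  induction kws with
  | nil => rfl
  | cons k rest ih =>
      rw [List.any_cons, ← ih]
      show (if PySem.Str.isIn k cl = true then true else loopA rest cl) = _
      cases hb : PySem.Str.isIn k cl <;>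
        simp only [hb, Bool.false_eq_true, if_false, if_true, Bool.false_or, Bool.true_or]

-- substring test unfolded one position: prefix here, or substring of the tail
theorem isIn_cons (sub : List Char) (c : Char) (rest : List Char) :
    PySem.Chars.isIn sub (c :: rest)
      = (PySem.Chars.startswith (c :: rest) sub || PySem.Chars.isIn sub rest) := by
  rw [Bool.eq_iff_iff]
  simp [PySem.Chars.isIn_iff_infix, PySem.Chars.startswith_iff, List.infix_cons_iff]

-- B's position scan equals 'any keyword is a substring'
theorem scanB_eq_any (cs : List Char) :
    scanB cs = approvalKeywords.any (fun k => PySem.Chars.isIn k.toList cs) := by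
  induction cs with
  | nil => decide
  | cons c rest ih =>
      rw [Bool.eq_iff_iff]
      simp only [scanB, ih, Bool.or_eq_true, List.any_eq_true, isIn_cons]
      constructor
      · rintro (⟨k, hk, h⟩ | ⟨k, hk, h⟩)
        · exact ⟨k, hk, Or.inl h⟩
        · exact ⟨k, hk, Or.inr h⟩
      · rintro ⟨k, hk, h⟩
        rcases h with h' | h'
        · exact Or.inl ⟨k, hk, h'⟩
        · exact Or.inr ⟨k, hk, h'⟩

-- ===== VERDICT (by name: the statement is the Claim_ definition above) =====
theorem determine_approval_needed_spec : Claim_equal_determine_approval_needed := by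
  intro content _
  unfold Spec_determine_approval_needed determine_approval_needed determine_approval_needed_alt
  rw [loopA_eq_any, scanB_eq_any]
  simp
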